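-- pv_equiv track=rewrite | github.com/foxxpy/Codingame-Puzzle-Facile | 038. Rooks Movements/rooks_movements.py | searching_possible_move
-- ===== SOURCE A (Python) =====
-- def searching_possible_move(pieces, rook_position, search_line, list_possible_move, line):
--
--     for axis in search_line:
--         position = axis+rook_position[line] if line else rook_position[line]+axis
--         if position in pieces.keys():
--             if pieces[position] == 1:
--                 list_possible_move.append("R"+rook_position+"x"+position)
--             return list_possible_move
--         list_possible_move.append("R"+rook_position+"-"+position)
--     return list_possible_move
-- ===== SOURCE B (Python) =====
-- def searching_possible_move(pieces, rook_position, search_line, list_possible_move, line):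
--     positions = [axis + rook_position[line] if line else rook_position[line] + axis
--                  for axis in search_line]
--     blocker = next((p for p in positions if p in pieces), None)
--     free = positions if blocker is None else positions[:positions.index(blocker)]
--     list_possible_move += ["R" + rook_position + "-" + p for p in free]
--     if blocker is not None and pieces[blocker] == 1:
--         list_possible_move.append("R" + rook_position + "x" + blocker)
--     return list_possible_move
-- ===== Notes on version B (the rewrite author's own statement) =====
-- stated objective: alternative
-- what changed: A interleaves blocker detection, capture and move emission in one scanning loop with an early return; B first builds the candidate-position list, locates the first blocker, emits the unblocked prefix as '-' moves in one batch and then appends the optional capture move.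
import Mathlib
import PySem

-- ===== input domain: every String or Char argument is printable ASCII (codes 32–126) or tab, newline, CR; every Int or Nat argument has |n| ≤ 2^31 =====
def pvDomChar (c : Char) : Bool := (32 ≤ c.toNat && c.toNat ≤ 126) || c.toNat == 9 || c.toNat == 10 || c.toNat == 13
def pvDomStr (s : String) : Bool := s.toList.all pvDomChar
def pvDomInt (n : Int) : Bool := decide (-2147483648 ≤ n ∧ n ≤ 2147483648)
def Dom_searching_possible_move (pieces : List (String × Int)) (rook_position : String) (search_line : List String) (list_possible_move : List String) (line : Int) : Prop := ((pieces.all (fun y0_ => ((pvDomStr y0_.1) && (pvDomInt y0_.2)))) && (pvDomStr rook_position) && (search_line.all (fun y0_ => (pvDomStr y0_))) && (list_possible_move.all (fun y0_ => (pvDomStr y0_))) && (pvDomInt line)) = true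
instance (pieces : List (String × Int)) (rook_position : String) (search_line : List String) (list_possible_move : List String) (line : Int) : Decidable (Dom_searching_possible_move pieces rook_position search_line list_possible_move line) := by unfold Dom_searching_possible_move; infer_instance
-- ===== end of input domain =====

-- B replaces A's single scan-with-early-return by a decomposition: build the candidate
-- positions, locate the first blocker, emit the unblocked prefix, then the optional capture
-- (objective: alternative). Both A and B mutate list_possible_move in place in Python; the
-- equivalence proved here is about the return value.

-- ===== PORT A =====
-- A's for-loop with early return, as structural recursion over search_line carrying the
-- accumulated list_possible_move.
def spmA_loop (pieces : List (String × Int)) (rook_position : String) (line : Int) :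
    List String → List String → List String
  | [], acc => acc
  | axis :: rest, acc =>
    let position : String :=
      match PySem.Str.pyGet? rook_position line with
      | some c => if line ≠ 0 then axis ++ String.ofList [c] else String.ofList [c] ++ axis
      | none => ""   -- IndexError in Python; excluded by Pre_
    match pieces.lookup position with
    | some v =>
      if v = 1 then acc ++ ["R" ++ rook_position ++ "x" ++ position] else acc
    | none =>
      spmA_loop pieces rook_position line rest
        (acc ++ ["R" ++ rook_position ++ "-" ++ position])

def searching_possible_move (pieces : List (String × Int)) (rook_position : String) (search_line : List String) (list_possible_move : List String) (line : Int) : List String :=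
  spmA_loop pieces rook_position line search_line list_possible_move

-- ===== PORT B =====
def searching_possible_move_alt (pieces : List (String × Int)) (rook_position : String) (search_line : List String) (list_possible_move : List String) (line : Int) : List String :=
  let positions := search_line.map (fun axis =>
    match PySem.Str.pyGet? rook_position line with
    | some c => if line ≠ 0 then axis ++ String.ofList [c] else String.ofList [c] ++ axis
    | none => "")   -- IndexError in Python; excluded by Pre_
  let blocker? := positions.find? (fun p => (pieces.lookup p).isSome)
  let free :=
    match blocker? with
    | none => positions
    | some b => positions.take ((PySem.List.index? positions b).getD 0)
  let out := list_possible_move ++ free.map (fun p => "R" ++ rook_position ++ "-" ++ p)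
  match blocker? with
  | some b =>
    if pieces.lookup b = some 1 then out ++ ["R" ++ rook_position ++ "x" ++ b] else out
  | none => out

-- ===== PRECONDITION & SPEC =====
-- Pre_ excludes only the inputs where Python raises IndexError: a nonempty search_line with
-- rook_position[line] out of range (the index is evaluated once per axis, so an empty
-- search_line never raises).
def Pre_searching_possible_move (pieces : List (String × Int)) (rook_position : String) (search_line : List String) (list_possible_move : List String) (line : Int) : Prop :=
  search_line = [] ∨ PySem.Raise.InRange rook_position.toList.length line
instance (pieces : List (String × Int)) (rook_position : String) (search_line : List String) (list_possible_move : List String) (line : Int) : Decidable (Pre_searching_possible_move pieces rook_position search_line list_possible_move line) := by unfold Pre_searching_possible_move; infer_instance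

def pvWitness_searching_possible_move : (List (String × Int)) × String × List String × List String × Int :=
  ([("b1", 1)], "a1", ["b", "c"], [], 0)

def Spec_searching_possible_move (pieces : List (String × Int)) (rook_position : String) (search_line : List String) (list_possible_move : List String) (line : Int) (out : List String) : Prop := out = searching_possible_move_alt pieces rook_position search_line list_possible_move line
instance (pieces : List (String × Int)) (rook_position : String) (search_line : List String) (list_possible_move : List String) (line : Int) (out : List String) : Decidable (Spec_searching_possible_move pieces rook_position search_line list_possible_move line out) := by unfold Spec_searching_possible_move; infer_instance

-- ===== CLAIM (what is proved, stated in full; the proofs are below) =====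
def Claim_equal_searching_possible_move : Prop := ∀ (pieces : List (String × Int)) (rook_position : String) (search_line : List String) (list_possible_move : List String) (line : Int), Dom_searching_possible_move pieces rook_position search_line list_possible_move line → Pre_searching_possible_move pieces rook_position search_line list_possible_move line → Spec_searching_possible_move pieces rook_position search_line list_possible_move line (searching_possible_move pieces rook_position search_line list_possible_move line)

-- ===== LEMMAS AND PROOFS =====

-- B's body after the positions list has been built.
def altCore (pieces : List (String × Int)) (rook_position : String)
    (positions acc : List String) : List String :=
  let blocker? := positions.find? (fun p => (pieces.lookup p).isSome)
  let free :=
    match blocker? with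
    | none => positions
    | some b => positions.take ((PySem.List.index? positions b).getD 0)
  let out := acc ++ free.map (fun p => "R" ++ rook_position ++ "-" ++ p)
  match blocker? with
  | some b =>
    if pieces.lookup b = some 1 then out ++ ["R" ++ rook_position ++ "x" ++ b] else out
  | none => out

lemma alt_eq_altCore (pieces : List (String × Int)) (rook_position : String)
    (search_line list_possible_move : List String) (line : Int) :
    searching_possible_move_alt pieces rook_position search_line list_possible_move line =
      altCore pieces rook_position
        (search_line.map (fun axis =>
          match PySem.Str.pyGet? rook_position line with
          | some c => if line ≠ 0 then axis ++ String.ofList [c] else String.ofList [c] ++ axis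
          | none => ""))
        list_possible_move := rfl

lemma altCore_nil (pieces : List (String × Int)) (rook_position : String)
    (acc : List String) : altCore pieces rook_position [] acc = acc := by
  simp [altCore]

lemma altCore_cons_none (pieces : List (String × Int)) (rook_position : String)
    (p : String) (ps acc : List String) (hp : pieces.lookup p = none) :
    altCore pieces rook_position (p :: ps) acc =
      altCore pieces rook_position ps (acc ++ ["R" ++ rook_position ++ "-" ++ p]) := by
  have hfind : (p :: ps).find? (fun q => (pieces.lookup q).isSome)
      = ps.find? (fun q => (pieces.lookup q).isSome) := by
    simp [List.find?, hp]
  cases h : ps.find? (fun q => (pieces.lookup q).isSome) with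
  | none =>
    simp [altCore, hfind, h, List.append_assoc]
  | some b =>
    have hb : (pieces.lookup b).isSome := by
      have := List.find?_some h
      simpa using this
    have hne : p ≠ b := by
      intro he; rw [← he, hp] at hb; simp at hb
    have hmem : b ∈ ps := List.mem_of_find?_eq_some h
    obtain ⟨i, hi⟩ : ∃ i, PySem.List.index? ps b = some i := by
      have := (PySem.List.index?_isSome_iff (xs := ps) (v := b)).mpr hmem
      exact Option.isSome_iff_exists.mp this
    have hi' : List.idxOf? b ps = some i := by
      rw [← PySem.List.index?_eq_idxOf?]; exact hi
    have hidx : List.idxOf? b (p :: ps) = some (i + 1) := by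
      rw [← PySem.List.index?_eq_idxOf?, PySem.List.index?_cons_of_ne _ hne, hi]; rfl
    simp [altCore, hfind, h, hidx, hi', List.take_succ_cons, List.append_assoc]

lemma altCore_cons_some (pieces : List (String × Int)) (rook_position : String)
    (p : String) (ps acc : List String) (v : Int) (hp : pieces.lookup p = some v) :
    altCore pieces rook_position (p :: ps) acc =
      if v = 1 then acc ++ ["R" ++ rook_position ++ "x" ++ p] else acc := by
  have hfind : (p :: ps).find? (fun q => (pieces.lookup q).isSome) = some p := by
    simp [List.find?, hp]
  have hidx : List.idxOf? p (p :: ps) = some 0 := by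
    rw [← PySem.List.index?_eq_idxOf?]; exact PySem.List.index?_cons_self p ps
  simp [altCore, hfind, hidx, hp]

lemma loop_eq_altCore (pieces : List (String × Int)) (rook_position : String) (line : Int)
    (axes acc : List String) :
    spmA_loop pieces rook_position line axes acc =
      altCore pieces rook_position
        (axes.map (fun axis =>
          match PySem.Str.pyGet? rook_position line with
          | some c => if line ≠ 0 then axis ++ String.ofList [c] else String.ofList [c] ++ axis
          | none => ""))
        acc := by
  induction axes generalizing acc with
  | nil => simp [spmA_loop, altCore_nil]
  | cons axis rest ih =>
    set p : String :=
      (match PySem.Str.pyGet? rook_position line with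
       | some c => if line ≠ 0 then axis ++ String.ofList [c] else String.ofList [c] ++ axis
       | none => "") with hpdef
    cases h : pieces.lookup p with
    | none =>
      rw [List.map_cons, altCore_cons_none pieces rook_position _ _ _ h]
      rw [← ih]
      simp only [spmA_loop, ← hpdef, h]
    | some v =>
      rw [List.map_cons, altCore_cons_some pieces rook_position _ _ _ v h]
      simp only [spmA_loop, ← hpdef, h]

-- ===== VERDICT (by name: the statement is the Claim_ definition above) =====
theorem searching_possible_move_spec : Claim_equal_searching_possible_move := by
  intro pieces rook_position search_line list_possible_move line _ _
  unfold Spec_searching_possible_move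
  rw [alt_eq_altCore, searching_possible_move, loop_eq_altCore]
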